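-- pv_equiv track=rewrite | github.com/hongminjoon/Freshman_repo | coding_test_python/1_16/26.py | solution
-- ===== SOURCE A (Python) =====
-- def solution(price, money, count):
--     answer = 0
--
--     sum = 0
--
--     for i in range(1, count+1):
--         sum += price * i
--
--     if sum < money:
--         answer = 0
--     else:
--         answer = sum - money
--
--     return answer
-- ===== SOURCE B (Python) =====
-- def solution(price, money, count):
--     total = price * (count * (count + 1) // 2) if count > 0 else 0
--     return max(total - money, 0)
-- ===== Notes on version B (the rewrite author's own statement) =====
-- stated objective: faster
-- what changed: Replaces the O(count) summation loop with the closed-form Gauss formula price*count*(count+1)//2 and expresses the clamped subtraction as max(total-money, 0).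
import Mathlib
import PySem

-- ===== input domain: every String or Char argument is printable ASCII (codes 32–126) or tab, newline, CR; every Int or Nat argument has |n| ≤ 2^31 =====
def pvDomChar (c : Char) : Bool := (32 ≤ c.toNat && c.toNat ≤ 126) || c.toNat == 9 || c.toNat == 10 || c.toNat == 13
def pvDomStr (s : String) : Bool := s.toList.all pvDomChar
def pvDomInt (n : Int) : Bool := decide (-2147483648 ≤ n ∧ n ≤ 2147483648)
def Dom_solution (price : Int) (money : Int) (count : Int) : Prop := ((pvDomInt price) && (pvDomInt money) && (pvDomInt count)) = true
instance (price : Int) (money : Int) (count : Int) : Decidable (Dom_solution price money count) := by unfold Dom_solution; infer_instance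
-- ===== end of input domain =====

-- B replaces A's O(count) summation loop with the closed-form Gauss formula (O(1)).

-- ===== PORT A =====
def solution (price : Int) (money : Int) (count : Int) : Int :=
  let sum := (PySem.List.pyRange 1 (count + 1) 1).foldl (fun s i => s + price * i) 0
  if sum < money then 0 else sum - money

-- ===== PORT B =====
def solution_alt (price : Int) (money : Int) (count : Int) : Int :=
  let total := if count > 0 then price * PySem.Int.floordiv (count * (count + 1)) 2 else 0
  max (total - money) 0

-- ===== PRECONDITION & SPEC =====
def Spec_solution (price : Int) (money : Int) (count : Int) (out : Int) : Prop := out = solution_alt price money count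
instance (price : Int) (money : Int) (count : Int) (out : Int) : Decidable (Spec_solution price money count out) := by unfold Spec_solution; infer_instance

-- ===== CLAIM (what is proved, stated in full; the proofs are below) =====
def Claim_equal_solution : Prop := ∀ (price : Int) (money : Int) (count : Int), Dom_solution price money count → Spec_solution price money count (solution price money count)

-- ===== LEMMAS AND PROOFS =====

-- Gauss: the loop of A sums price*i for i = 1..n.
theorem pv_loop_sum (price : Int) (n : Nat) :
    (PySem.List.pyRange 1 ((n : Int) + 1) 1).foldl (fun s i => s + price * i) 0
      = price * PySem.Int.floordiv ((n : Int) * ((n : Int) + 1)) 2 := by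
  induction n with
  | zero =>
      rw [PySem.List.pyRange_one_eq_nil (by norm_num)]
      rw [PySem.Int.floordiv_eq_ediv_of_pos (by norm_num)]
      simp
  | succ k ih =>
      have h : ((k : Int) + 1 : Int) + 1 = (((k + 1 : Nat) : Int)) + 1 := by push_cast; ring
      rw [← h, PySem.List.pyRange_one_succ_right (by omega), List.foldl_append]
      simp only [List.foldl_cons, List.foldl_nil]
      rw [ih]
      rw [PySem.Int.floordiv_eq_ediv_of_pos (by norm_num),
          PySem.Int.floordiv_eq_ediv_of_pos (by norm_num)]
      push_cast
      have h2 : (2 : Int) ∣ (k : Int) * ((k : Int) + 1) := Int.even_mul_succ_self (k : Int) |>.two_dvd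
      have h3 : (2 : Int) ∣ ((k : Int) + 1) * (((k : Int) + 1) + 1) := Int.even_mul_succ_self ((k : Int) + 1) |>.two_dvd
      obtain ⟨t, ht⟩ := h2
      obtain ⟨u, hu⟩ := h3
      rw [ht, hu, Int.mul_ediv_cancel_left _ (by norm_num), Int.mul_ediv_cancel_left _ (by norm_num)]
      have h4 : (2 : Int) * u = 2 * t + 2 * ((k : Int) + 1) := by rw [← hu, ← ht]; ring
      have : u = t + ((k : Int) + 1) := by omega
      rw [this]; ring

theorem pv_loop_sum_nonpos (price : Int) (count : Int) (h : count ≤ 0) :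
    (PySem.List.pyRange 1 (count + 1) 1).foldl (fun s i => s + price * i) 0 = 0 := by
  rw [PySem.List.pyRange_one_eq_nil (by omega)]
  simp

-- ===== VERDICT (by name: the statement is the Claim_ definition above) =====
theorem solution_spec : Claim_equal_solution := by
  intro price money count _
  unfold Spec_solution solution solution_alt
  by_cases hc : count > 0
  · have hn : count = ((count.toNat : Int)) := by omega
    simp only [hc, if_pos]
    rw [hn, pv_loop_sum price count.toNat]
    omega
  · simp only [hc, if_false]
    rw [pv_loop_sum_nonpos price count (by omega)]
    omega
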